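-- pv_equiv track=rewrite | github.com/alejezvir/stega | pixel.py | decryption
-- ===== SOURCE A (Python) =====
-- def shortest_sequence_range(*args):
-- 	return range(len(sorted(args, key=len)[0]))
--
-- encryption_pixels = []
--
-- def decryption(encryption_pixels, passwd):
--
-- 	decryption_bin_pixels=[]
-- 	decryption_bin_pixels_new = []
-- 	decryption_dec_pixels = []
-- 	a=[]
--
-- 	for i in encryption_pixels:
-- 		if i % 2 == 1:
-- 			decryption_bin_pixels.append(1)
-- 		if i % 2 == 0:
-- 			decryption_bin_pixels.append(0)
--
-- 	decryption_bin_pixels_new =[decryption_bin_pixels[d:d+8] for d in range(0, len(decryption_bin_pixels), 8)]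
-- 	arr=[]
--
-- 	for i in decryption_bin_pixels_new:
-- 		a =''.join(map(str,i))
-- 		arr.append(int(a,2))
--
-- 	g = ([ord(passwd[i]), arr[i]]
-- 		for i in shortest_sequence_range(passwd,arr))
--
-- 	arr_msg = []
--
-- 	for item in g:
-- 		a = item[0]^item[1]
-- 		arr_msg.append(chr(a))
--
-- 	msg = ''.join(arr_msg)
--
-- 	return msg
-- ===== SOURCE B (Python) =====
-- def decryption(encryption_pixels, passwd):
--     # one pass: accumulate each byte arithmetically from 8 consecutive LSBs
--     vals = []
--     val = 0
--     nbits = 0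
--     for p in encryption_pixels:
--         val = val * 2 + (p % 2)
--         nbits += 1
--         if nbits == 8:
--             vals.append(val)
--             val = 0
--             nbits = 0
--     if nbits:
--         vals.append(val)
--     n = min(len(passwd), len(vals))
--     return ''.join(chr(ord(passwd[i]) ^ vals[i]) for i in range(n))
-- ===== Notes on version B (the rewrite author's own statement) =====
-- stated objective: simpler
-- what changed: One pass over the pixels accumulating each byte arithmetically (val = val*2 + p%2) instead of building a bit list, slicing it into 8-chunks, joining digit strings and re-parsing them with int(_,2); then a direct min-length XOR join.
import Mathlib
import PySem

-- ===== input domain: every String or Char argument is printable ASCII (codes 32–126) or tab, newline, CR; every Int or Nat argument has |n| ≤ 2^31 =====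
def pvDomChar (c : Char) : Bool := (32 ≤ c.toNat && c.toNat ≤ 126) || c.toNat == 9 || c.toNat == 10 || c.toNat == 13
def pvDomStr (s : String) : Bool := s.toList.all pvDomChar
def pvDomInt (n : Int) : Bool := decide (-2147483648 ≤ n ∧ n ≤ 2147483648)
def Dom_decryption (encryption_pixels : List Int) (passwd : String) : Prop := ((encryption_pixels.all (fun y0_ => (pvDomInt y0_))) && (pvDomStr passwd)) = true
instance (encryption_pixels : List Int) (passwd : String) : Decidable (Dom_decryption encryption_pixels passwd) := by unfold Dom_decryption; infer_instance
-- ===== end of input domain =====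

-- B builds each byte arithmetically in one pass instead of A's bit list / 8-slices / digit-string / int(_,2) pipeline; return value only, no argument is mutated.

-- ===== PORT A =====
-- the loop body with its two sequential ifs
def aBitsStep (acc : List Int) (i : Int) : List Int :=
  let acc1 := if PySem.Int.mod i 2 = 1 then acc ++ [1] else acc
  if PySem.Int.mod i 2 = 0 then acc1 ++ [0] else acc1

-- int(a, 2): hand port, exact for the strings of '0'/'1' digits it receives here
def parseBin (s : String) : Int :=
  s.toList.foldl (fun v c => v * 2 + ((c.toNat : Int) - 48)) 0

-- ''.join(map(str, chunk))
def joinBits (chunk : List Int) : String :=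
  PySem.Str.join "" (chunk.map PySem.Int.toStr)

-- shortest_sequence_range(passwd, arr) specialised to its two arguments (stable sort of two by length)
def shortestLen (s : String) (arr : List Int) : Int :=
  if PySem.Str.len s ≤ (arr.length : Int) then PySem.Str.len s else (arr.length : Int)

def decryption (encryption_pixels : List Int) (passwd : String) : String :=
  let bits := encryption_pixels.foldl aBitsStep []
  let chunks := (PySem.List.pyRange 0 (bits.length : Int) 8).map
    (fun d => PySem.List.slice bits (some d) (some (d + 8)))
  let arr := chunks.map (fun c => parseBin (joinBits c))
  let n := shortestLen passwd arr
  String.mk ((PySem.List.pyRange 0 n 1).map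
    (fun i => Char.ofNat (PySem.Int.bxor ((passwd.toList.getD i.toNat ' ').toNat : Int)
                                          (arr.getD i.toNat 0)).toNat))

-- ===== PORT B =====
-- the single pass: vals, val, nbits as in Source B
def altLoop : List Int → List Int → Int → Nat → List Int
  | [], vals, val, nbits => if nbits ≠ 0 then vals ++ [val] else vals
  | p :: rest, vals, val, nbits =>
    let v' := val * 2 + PySem.Int.mod p 2
    if nbits + 1 = 8 then altLoop rest (vals ++ [v']) 0 0
    else altLoop rest vals v' (nbits + 1)

def decryption_alt (encryption_pixels : List Int) (passwd : String) : String :=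
  let vals := altLoop encryption_pixels [] 0 0
  let n := min passwd.toList.length vals.length
  String.mk ((List.range n).map
    (fun i => Char.ofNat (PySem.Int.bxor ((passwd.toList.getD i ' ').toNat : Int)
                                          (vals.getD i 0)).toNat))

-- ===== PRECONDITION & SPEC =====
def Spec_decryption (encryption_pixels : List Int) (passwd : String) (out : String) : Prop := out = decryption_alt encryption_pixels passwd
instance (encryption_pixels : List Int) (passwd : String) (out : String) : Decidable (Spec_decryption encryption_pixels passwd out) := by unfold Spec_decryption; infer_instance

-- ===== CLAIM (what is proved, stated in full; the proofs are below) =====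
def Claim_equal_decryption : Prop := ∀ (encryption_pixels : List Int) (passwd : String), Dom_decryption encryption_pixels passwd → Spec_decryption encryption_pixels passwd (decryption encryption_pixels passwd)

-- ===== LEMMAS AND PROOFS =====

-- the common byte-accumulation step
def bstep (v b : Int) : Int := v * 2 + b

-- values of the 8-chunks of a bit list, with a pending partial byte (val, k)
def chunkCont (val : Int) (k : Nat) : List Int → List Int
  | [] => if k = 0 then [] else [val]
  | b :: t => if k + 1 = 8 then bstep val b :: chunkCont 0 0 t else chunkCont (bstep val b) (k + 1) t

theorem aBits_eq (px : List Int) (acc : List Int) :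
    px.foldl aBitsStep acc = acc ++ px.map (fun i => PySem.Int.mod i 2) := by
  induction px generalizing acc with
  | nil => simp
  | cons p t ih =>
    rcases PySem.Int.mod_two_eq p with h | h <;>
      · simp only [List.foldl_cons, aBitsStep, h, List.map_cons]
        norm_num [ih, List.append_assoc]

theorem altLoop_eq (px : List Int) (vals : List Int) (val : Int) (k : Nat) :
    altLoop px vals val k = vals ++ chunkCont val k (px.map (fun i => PySem.Int.mod i 2)) := by
  induction px generalizing vals val k with
  | nil => cases k <;> simp [altLoop, chunkCont]
  | cons p t ih =>
    by_cases h : k + 1 = 8 <;>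
      simp [altLoop, chunkCont, h, ih, bstep, List.append_assoc]

theorem chunkCont_spec (bs : List Int) (val : Int) (k : Nat) (hk : k < 8) :
    chunkCont val k bs =
      if bs.length = 0 ∧ k = 0 then []
      else if bs.length + k ≤ 8 then [bs.foldl bstep val]
      else (bs.take (8 - k)).foldl bstep val :: chunkCont 0 0 (bs.drop (8 - k)) := by
  induction bs generalizing val k with
  | nil =>
    simp only [List.length_nil]
    by_cases h : k = 0
    · subst h; simp [chunkCont]
    · rw [if_neg (fun hc => h hc.2), if_pos (by omega)]
      simp [chunkCont, h]
  | cons b t ih =>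
    simp only [List.length_cons]
    by_cases h : k + 1 = 8
    · have hk7 : k = 7 := by omega
      subst hk7
      rw [chunkCont, if_pos rfl]
      cases t with
      | nil =>
        simp only [List.length_nil]
        rw [if_neg (by omega), if_pos (by omega)]
        simp [chunkCont, List.foldl]
      | cons c u =>
        simp only [List.length_cons]
        rw [if_neg (by omega), if_neg (by omega)]
        simp [List.foldl_cons]
    · have hk1 : k + 1 < 8 := by omega
      rw [chunkCont, if_neg h, ih _ _ hk1,
          if_neg (show ¬(t.length = 0 ∧ k + 1 = 0) by omega),
          if_neg (show ¬(t.length + 1 = 0 ∧ k = 0) by omega)]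
      by_cases hle : t.length + (k + 1) ≤ 8
      · rw [if_pos hle, if_pos (show t.length + 1 + k ≤ 8 by omega), List.foldl_cons]
      · rw [if_neg hle, if_neg (show ¬(t.length + 1 + k ≤ 8) by omega),
            show (8 - k) = (8 - (k + 1)) + 1 by omega, List.take_succ_cons,
            List.drop_succ_cons, List.foldl_cons]

theorem chunkCont_step (bs : List Int) (h : bs ≠ []) :
    chunkCont 0 0 bs = (bs.take 8).foldl bstep 0 :: chunkCont 0 0 (bs.drop 8) := by
  rw [chunkCont_spec bs 0 0 (by omega)]
  have hl : bs.length ≠ 0 := by simpa using h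
  by_cases hle : bs.length ≤ 8
  · rw [if_neg (by omega), if_pos (by omega)]
    rw [List.take_of_length_le hle, List.drop_eq_nil_of_le hle]
    simp [chunkCont]
  · rw [if_neg (by omega), if_neg (by omega)]

theorem range_chunks (m : Nat) (bs : List Int) (hm : m = (bs.length + 7) / 8) :
    (List.range m).map (fun k => ((bs.drop (8 * k)).take 8).foldl bstep 0)
      = chunkCont 0 0 bs := by
  induction m generalizing bs with
  | zero =>
    cases bs with
    | nil => simp [chunkCont]
    | cons b t => simp at hm; omega
  | succ m ih =>
    have hne : bs ≠ [] := by
      intro h; subst h; simp at hm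
    rw [List.range_succ_eq_map, List.map_cons, List.map_map, chunkCont_step bs hne]
    refine congrArg₂ List.cons (by simp) ?_
    rw [← ih (bs.drop 8) (by
      have h1 : bs.length ≠ 0 := by simpa using hne
      simp only [List.length_drop]; omega)]
    refine List.map_congr_left (fun k _ => ?_)
    simp [List.drop_drop, Function.comp]
    ring_nf

theorem parse_join (chunk : List Int) (hb : ∀ b ∈ chunk, b = 0 ∨ b = 1) :
    parseBin (joinBits chunk) = chunk.foldl bstep 0 := by
  unfold parseBin joinBits
  rw [PySem.Str.toList_join]
  have h1 : (chunk.map PySem.Int.toStr).map String.toList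
      = (chunk.map (fun b => if b = 1 then '1' else '0')).map (fun c => [c]) := by
    simp only [List.map_map]
    refine List.map_congr_left (fun b hbmem => ?_)
    rcases hb b hbmem with h | h <;> subst h <;> decide
  rw [h1, show ("" : String).toList = [] from rfl, PySem.Chars.join_nil_singletons,
      List.foldl_map]
  refine PySem.List.foldl_congr_mem chunk _ _ 0 (fun acc b hbmem => ?_)
  rcases hb b hbmem with h | h <;> subst h <;>
    · simp only [bstep]; push_cast; ring

-- ===== VERDICT (by name: the statement is the Claim_ definition above) =====
theorem decryption_spec : Claim_equal_decryption := by
  intro px passwd _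
  show decryption px passwd = decryption_alt px passwd
  unfold decryption decryption_alt
  dsimp only
  rw [aBits_eq px [], List.nil_append, altLoop_eq px [] 0 0, List.nil_append]
  set bits := px.map (fun i => PySem.Int.mod i 2) with hbits
  have hbit : ∀ b ∈ bits, b = 0 ∨ b = 1 := by
    intro b hmem
    rcases List.mem_map.mp hmem with ⟨i, _, rfl⟩
    exact PySem.Int.mod_two_eq i
  -- arr = chunkCont 0 0 bits
  have harr : ((PySem.List.pyRange 0 (bits.length : Int) 8).map
      (fun d => PySem.List.slice bits (some d) (some (d + 8)))).map
      (fun c => parseBin (joinBits c)) = chunkCont 0 0 bits := by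
    rw [PySem.List.pyRange_of_pos 0 (bits.length : Int) (by omega)]
    have hm : (if (0 : Int) < (bits.length : Int)
        then (((bits.length : Int) - 0 + 8 - 1) / 8).toNat else 0)
        = (bits.length + 7) / 8 := by
      by_cases h : (0 : Int) < (bits.length : Int) <;> simp only [h, if_true, if_false] <;> omega
    rw [hm, ← range_chunks ((bits.length + 7) / 8) bits rfl, List.map_map, List.map_map]
    refine List.map_congr_left (fun k _ => ?_)
    simp only [Function.comp_apply]
    have e1 : (0 : Int) + 8 * (k : Int) = ((8 * k : Nat) : Int) := by push_cast; ring
    have e2 : (0 : Int) + 8 * (k : Int) + 8 = ((8 * k : Nat) : Int) + ((8 : Nat) : Int) := by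
      push_cast; ring
    rw [e2, e1, PySem.List.slice_natCast_add]
    exact parse_join _ (fun b hmem => hbit b
      (List.mem_of_mem_drop (List.mem_of_mem_take hmem)))
  rw [harr]
  -- equal index range
  have hn : shortestLen passwd (chunkCont 0 0 bits)
      = ((min passwd.toList.length (chunkCont 0 0 bits).length : Nat) : Int) := by
    unfold shortestLen
    rw [PySem.Str.len_eq]
    by_cases h : passwd.toList.length ≤ (chunkCont 0 0 bits).length
    · rw [if_pos (by exact_mod_cast h), Nat.min_def, if_pos h]
    · rw [if_neg (fun hc => h (by exact_mod_cast hc)), Nat.min_def, if_neg h]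
  rw [hn, PySem.List.pyRange_zero_natCast, List.map_map]
  refine congrArg String.mk (List.map_congr_left (fun k _ => ?_))
  simp
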